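-- pv_equiv track=rewrite | github.com/Adarsh5268/Blind-Bit | client/regex_engine.py | expand_character_class
-- ===== SOURCE A (Python) =====
-- import string
--
-- def expand_character_class(pattern: str, max_expansions: int = 50) -> list:
--     """Expand a character class into concrete characters.
--
--     [a-z] → ['a','b',...,'z']
--     [0-9] → ['0','1',...,'9']
--     [abc] → ['a','b','c']
--     """
--     if not pattern.startswith('[') or not pattern.endswith(']'):
--         return [pattern]
--
--     inner = pattern[1:-1]
--     negated = False
--     if inner.startswith('^'):
--         negated = True
--         inner = inner[1:]
--
--     chars = set()
--     i = 0
--     while i < len(inner):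
--         if i + 2 < len(inner) and inner[i + 1] == '-':
--             # Range
--             start_c, end_c = inner[i], inner[i + 2]
--             for c in range(ord(start_c), ord(end_c) + 1):
--                 chars.add(chr(c))
--             i += 3
--         elif inner[i] == '\\' and i + 1 < len(inner):
--             nc = inner[i + 1]
--             if nc == 'd':
--                 chars.update(string.digits)
--             elif nc == 'w':
--                 chars.update(string.ascii_letters + string.digits + '_')
--             else:
--                 chars.add(nc)
--             i += 2
--         else:
--             chars.add(inner[i])
--             i += 1
--
--     if negated:
--         all_printable = set(string.printable) - set(string.whitespace)
--         chars = all_printable - chars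
--
--     result = sorted(chars)[:max_expansions]
--     return result
-- ===== SOURCE B (Python) =====
-- import string
--
-- def expand_character_class(pattern: str, max_expansions: int = 50) -> list:
--     """Tokenize-then-expand re-implementation: pass 1 builds a token list
--     (range / escape / literal), pass 2 expands tokens into the set."""
--     if not (pattern.startswith('[') and pattern.endswith(']')):
--         return [pattern]
--     inner = pattern[1:-1]
--     negated = inner.startswith('^')
--     if negated:
--         inner = inner[1:]
--
--     # pass 1: tokenize (same branch priority: range, then escape, then literal)
--     tokens = []
--     i, n = 0, len(inner)
--     while i < n:
--         if i + 2 < n and inner[i + 1] == '-':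
--             tokens.append(('range', inner[i], inner[i + 2]))
--             i += 3
--         elif inner[i] == '\\' and i + 1 < n:
--             tokens.append(('esc', inner[i + 1]))
--             i += 2
--         else:
--             tokens.append(('lit', inner[i]))
--             i += 1
--
--     # pass 2: expand tokens
--     chars = set()
--     for tok in tokens:
--         if tok[0] == 'range':
--             for c in range(ord(tok[1]), ord(tok[2]) + 1):
--                 chars.add(chr(c))
--         elif tok[0] == 'esc':
--             nc = tok[1]
--             if nc == 'd':
--                 chars.update(string.digits)
--             elif nc == 'w':
--                 chars.update(string.ascii_letters + string.digits + '_')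
--             else:
--                 chars.add(nc)
--         else:
--             chars.add(tok[1])
--
--     if negated:
--         chars = (set(string.printable) - set(string.whitespace)) - chars
--     return sorted(chars)[:max_expansions]
-- ===== Notes on version B (the rewrite author's own statement) =====
-- stated objective: alternative
-- what changed: A expands the class in a single index-based while loop that mutates the char set inline; B is a two-pass parser that first tokenizes the inner text into range/escape/literal tokens and then expands the token list into the set, with the same negation/sort/truncation tail.
import Mathlib
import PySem

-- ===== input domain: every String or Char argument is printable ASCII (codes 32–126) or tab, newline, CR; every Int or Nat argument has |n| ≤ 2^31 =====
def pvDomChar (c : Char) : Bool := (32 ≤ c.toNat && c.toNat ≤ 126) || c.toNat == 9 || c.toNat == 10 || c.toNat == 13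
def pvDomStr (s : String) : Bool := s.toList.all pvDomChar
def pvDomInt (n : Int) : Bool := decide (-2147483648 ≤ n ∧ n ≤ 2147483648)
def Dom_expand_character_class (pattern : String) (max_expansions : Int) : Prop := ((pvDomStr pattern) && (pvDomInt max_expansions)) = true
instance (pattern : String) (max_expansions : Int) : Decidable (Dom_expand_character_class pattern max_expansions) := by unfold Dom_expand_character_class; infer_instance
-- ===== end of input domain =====

-- B re-implements A's one-pass index loop as a tokenize-then-expand two-pass parser (objective: alternative decomposition, same cost).
-- Single-character Python strings are modelled as Char; the final sorted list is mapped to one-character Strings (ASCII order agrees).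

-- ===== PORT A =====
def pvDigits : List Char := "0123456789".toList
def pvWordChars : List Char := "abcdefghijklmnopqrstuvwxyzABCDEFGHIJKLMNOPQRSTUVWXYZ0123456789_".toList
def pvPrintable : List Char := "0123456789abcdefghijklmnopqrstuvwxyzABCDEFGHIJKLMNOPQRSTUVWXYZ!\"#$%&'()*+,-./:;<=>?@[\\]^_`{|}~ \t\n\r\x0b\x0c".toList
def pvWhitespace : List Char := " \t\n\r\x0b\x0c".toList

-- A's while loop: index i over inner; 'i + 2 < len' means ≥ 3 chars remain from i,
-- so the loop is the structural recursion on the remaining suffix, same branch order.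
def pvALoop : List Char → PySem.Set Char → PySem.Set Char
  | a :: b :: c :: rest, chars =>
    if b = '-' then
      -- Range branch: for c in range(ord(start), ord(end)+1): chars.add(chr(c))
      pvALoop rest ((PySem.List.pyRange (a.toNat : Int) ((c.toNat : Int) + 1) 1).foldl
        (fun s n => PySem.Set.add s (Char.ofNat n.toNat)) chars)
    else if a = '\\' then
      pvALoop (c :: rest)
        (if b = 'd' then PySem.Set.update chars pvDigits
         else if b = 'w' then PySem.Set.update chars pvWordChars
         else PySem.Set.add chars b)
    else
      pvALoop (b :: c :: rest) (PySem.Set.add chars a)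
  | [a, b], chars =>
    if a = '\\' then
      (if b = 'd' then PySem.Set.update chars pvDigits
       else if b = 'w' then PySem.Set.update chars pvWordChars
       else PySem.Set.add chars b)
    else
      pvALoop [b] (PySem.Set.add chars a)
  | [a], chars => PySem.Set.add chars a
  | [], chars => chars

def expand_character_class (pattern : String) (max_expansions : Int) : List String :=
  if ¬ PySem.Str.startswith pattern "[" ∨ ¬ PySem.Str.endswith pattern "]" then
    [pattern]
  else
    let inner0 := PySem.List.slice pattern.toList (some 1) (some (-1))
    let negated := PySem.Chars.startswith inner0 ['^']
    let inner := if negated then PySem.List.slice inner0 (some 1) none else inner0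
    let chars := pvALoop inner PySem.Set.empty
    let chars2 :=
      if negated then
        PySem.Set.diff (PySem.Set.diff (PySem.Set.ofList pvPrintable) (PySem.Set.ofList pvWhitespace)) chars
      else chars
    PySem.List.slice ((PySem.List.sorted chars2 (fun x => x) false).map (fun c => String.ofList [c]))
      none (some max_expansions)

-- ===== PORT B =====
inductive PvTok where
  | rng : Char → Char → PvTok
  | esc : Char → PvTok
  | lit : Char → PvTok
deriving DecidableEq, Repr

-- pass 1: the tokenizer (same branch priority: range, then escape, then literal)
def pvTokenize : List Char → List PvTok
  | a :: b :: c :: rest =>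
    if b = '-' then PvTok.rng a c :: pvTokenize rest
    else if a = '\\' then PvTok.esc b :: pvTokenize (c :: rest)
    else PvTok.lit a :: pvTokenize (b :: c :: rest)
  | [a, b] =>
    if a = '\\' then [PvTok.esc b] else PvTok.lit a :: pvTokenize [b]
  | [a] => [PvTok.lit a]
  | [] => []

-- pass 2: expand one token into the set
def pvExpandTok (chars : PySem.Set Char) : PvTok → PySem.Set Char
  | PvTok.rng a c =>
    (PySem.List.pyRange (a.toNat : Int) ((c.toNat : Int) + 1) 1).foldl
      (fun s n => PySem.Set.add s (Char.ofNat n.toNat)) chars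
  | PvTok.esc nc =>
    if nc = 'd' then PySem.Set.update chars pvDigits
    else if nc = 'w' then PySem.Set.update chars pvWordChars
    else PySem.Set.add chars nc
  | PvTok.lit a => PySem.Set.add chars a

def expand_character_class_alt (pattern : String) (max_expansions : Int) : List String :=
  if ¬ PySem.Str.startswith pattern "[" ∨ ¬ PySem.Str.endswith pattern "]" then
    [pattern]
  else
    let inner0 := PySem.List.slice pattern.toList (some 1) (some (-1))
    let negated := PySem.Chars.startswith inner0 ['^']
    let inner := if negated then PySem.List.slice inner0 (some 1) none else inner0
    let chars := (pvTokenize inner).foldl pvExpandTok PySem.Set.empty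
    let chars2 :=
      if negated then
        PySem.Set.diff (PySem.Set.diff (PySem.Set.ofList pvPrintable) (PySem.Set.ofList pvWhitespace)) chars
      else chars
    PySem.List.slice ((PySem.List.sorted chars2 (fun x => x) false).map (fun c => String.ofList [c]))
      none (some max_expansions)

-- ===== PRECONDITION & SPEC =====
def Spec_expand_character_class (pattern : String) (max_expansions : Int) (out : List String) : Prop := out = expand_character_class_alt pattern max_expansions
instance (pattern : String) (max_expansions : Int) (out : List String) : Decidable (Spec_expand_character_class pattern max_expansions out) := by unfold Spec_expand_character_class; infer_instance

-- ===== CLAIM (what is proved, stated in full; the proofs are below) =====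
def Claim_equal_expand_character_class : Prop := ∀ (pattern : String) (max_expansions : Int), Dom_expand_character_class pattern max_expansions → Spec_expand_character_class pattern max_expansions (expand_character_class pattern max_expansions)

-- ===== LEMMAS AND PROOFS =====

-- Expanding the token list of `l` is exactly A's single-pass loop over `l`.
theorem pvTokFold (l : List Char) (s : PySem.Set Char) :
    (pvTokenize l).foldl pvExpandTok s = pvALoop l s := by
  fun_induction pvALoop l s <;> simp_all [pvTokenize, pvExpandTok]

-- ===== VERDICT (by name: the statement is the Claim_ definition above) =====
theorem expand_character_class_spec : Claim_equal_expand_character_class := by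
  intro pattern max_expansions _
  unfold Spec_expand_character_class expand_character_class expand_character_class_alt
  simp only [pvTokFold]
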